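-- pv_equiv track=rewrite | github.com/pengzhefu/LeetCodePython | sort/hard/q527.py | wordsAbbreviation
-- ===== SOURCE A (Python) =====
-- from collections import defaultdict
--
-- def wordsAbbreviation(words: [str]) -> [str]:
--     groups = defaultdict(list)  ## 里面这个list是说明value的基本形式就是list, 如果是单个的话也是list形式保存
--     for i, w in enumerate(words):
--         groups[(w[0], w[-1], len(w))].append((i, w))  ## 所以这里采用上append
--     ## 所以groups的key是这个word的(首字符,尾字符,长度), value是相应的单词的index和他本身
--     ret = [word[0]+str(len(word)-2)+word[-1] if len(word)>3 else word for word in words]  ## 先进行粗略缩写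
--     def abbreviate(group,start,leng):## the words in tuple(index+word), start char, the length of word
--         def trim(group, prefix):  ## prefix是缩写以后的前缀长度
--             if prefix >= leng - 2:  ## 如果prefix过长
--                 for i, w in group:  ## i,w分别是index, word
--                     ret[i] = w
--             elif len(group) == 1:  ## 如果进行一次trim以后, 没有重复了,也就是value的个数变为1
--                 i, w = group[0]
--                 if prefix >= leng - 2: ret[i] =  w  ## 如果prefix过长
--                 else:
--                     ret[i] = w[:prefix] + str(leng - prefix - 1) + w[-1]
--             else:   ## 这个是最关键的一步, 要进行trim
--                 prefix += 1  ## 先说明prefix长度要增加了,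
--                 dup = defaultdict(list)  ## 新建一个dup, 用来看新的prefix会不会还重复
--                 for i,w in group:
--                     dup[w[prefix-1]].append((i, w))  ## 新的dup的key只有新的前缀了, 只要这个不一样就行
--                 for g in dup.values():
--                     trim(g, prefix)  ## 然后再对trim以后的每一个进行检验
--
--         if len(group) <=1:  ## 如果只有一个, 没必要trim
--             return
--         else:
--             trim(group,1)
--     for key, group in groups.items():
--         abbreviate(group,key[0],key[2])
--     return ret
-- ===== SOURCE B (Python) =====
-- def wordsAbbreviation(words: [str]) -> [str]:
--     out = []
--     for i, w in enumerate(words):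
--         L = len(w)
--         m = 0
--         for j, v in enumerate(words):
--             if j != i and len(v) == L and v[0] == w[0] and v[-1] == w[-1]:
--                 k = 0
--                 while k < L and v[k] == w[k]:
--                     k += 1
--                 if k > m:
--                     m = k
--         p = m + 1
--         out.append(w if p >= L - 2 else w[:p] + str(L - p - 1) + w[-1])
--     return out
-- ===== Notes on version B (the rewrite author's own statement) =====
-- stated objective: alternative
-- what changed: A refines groups keyed by (first,last,len) through recursively nested per-character dicts, mutating a result list; B has no recursion and no dicts: for each word it directly takes the maximum common-prefix length with every other word sharing (first,last,len) and emits prefix = maxLCP+1, falling back to the full word when the abbreviation would not be shorter.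
import Mathlib
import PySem

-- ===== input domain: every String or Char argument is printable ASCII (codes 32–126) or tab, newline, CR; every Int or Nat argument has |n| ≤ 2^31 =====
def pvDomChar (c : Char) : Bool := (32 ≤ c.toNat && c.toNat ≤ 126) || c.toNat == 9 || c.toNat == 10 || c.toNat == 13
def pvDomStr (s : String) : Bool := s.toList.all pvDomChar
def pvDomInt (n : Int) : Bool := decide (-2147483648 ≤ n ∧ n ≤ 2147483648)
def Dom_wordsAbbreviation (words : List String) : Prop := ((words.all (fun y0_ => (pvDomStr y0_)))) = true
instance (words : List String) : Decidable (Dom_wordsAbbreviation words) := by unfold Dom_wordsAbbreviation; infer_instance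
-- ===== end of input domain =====

-- B replaces A's recursive per-character dict refinement by a direct max-LCP scan per word
-- (no recursion, no dicts); same return value on every list of nonempty words.

-- helpers shared by both ports: w[-1], the key (w[0], w[-1], len(w)) components,
-- and the abbreviation string  w[:p] + str(L-p-1) + w[-1]  both Pythons build.
def pvLast (w : String) : Char := PySem.List.pyGetD w.toList (-1) ' '
def pvAbbr (w : String) (p L : Int) : String :=
  String.ofList (PySem.List.slice w.toList none (some p) ++ PySem.Int.toChars (L - p - 1) ++ [pvLast w])

-- ===== PORT A =====
def pvKey (w : String) : Char × Char × Int :=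
  (PySem.List.pyGetD w.toList 0 ' ', pvLast w, PySem.Str.len w)

-- inner recursive 'trim(group, prefix)' threading the mutated 'ret' list
def pvTrim (leng : Int) (group : List (Int × String)) (pfx : Int) (ret : List String) : List String :=
  if pfx ≥ leng - 2 then
    group.foldl (fun r e => PySem.List.pySetD r e.1 e.2) ret
  else if group.length = 1 then
    match group with
    | e :: _ => PySem.List.pySetD ret e.1 (if pfx ≥ leng - 2 then e.2 else pvAbbr e.2 pfx leng)
    | [] => ret
  else
    let pfx' := pfx + 1
    let dup := group.foldl
      (fun d e => d.modify (PySem.List.pyGetD e.2.toList (pfx' - 1) ' ') [] (· ++ [e]))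
      PySem.Dict.empty
    dup.values.foldl (fun r g => pvTrim leng g pfx' r) ret
termination_by (leng - 2 - pfx).toNat
decreasing_by omega

def pvAbbreviate (group : List (Int × String)) (_start : Char) (leng : Int) (ret : List String) : List String :=
  if group.length ≤ 1 then ret else pvTrim leng group 1 ret

def wordsAbbreviation (words : List String) : List String :=
  let groups := (PySem.List.enumerate words 0).foldl
    (fun d e => d.modify (pvKey e.2) [] (· ++ [e])) PySem.Dict.empty
  let ret := words.map (fun w =>
    if PySem.Str.len w > 3 then
      String.ofList ([PySem.List.pyGetD w.toList 0 ' '] ++ PySem.Int.toChars (PySem.Str.len w - 2) ++ [pvLast w])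
    else w)
  groups.items.foldl (fun r kg => pvAbbreviate kg.2 kg.1.1 kg.1.2.2 r) ret

-- ===== PORT B =====
-- the while loop  k = 0; while k < L and v[k] == w[k]: k += 1  over two same-length strings
def pvLcp : List Char → List Char → Int
  | a :: as, b :: bs => if a = b then 1 + pvLcp as bs else 0
  | _, _ => 0

def wordsAbbreviation_alt (words : List String) : List String :=
  (PySem.List.enumerate words 0).foldl (fun out e =>
    let w := e.2
    let L := PySem.Str.len w
    let m := (PySem.List.enumerate words 0).foldl (fun m f =>
      if f.1 ≠ e.1 ∧ PySem.Str.len f.2 = L ∧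
         PySem.List.pyGetD f.2.toList 0 ' ' = PySem.List.pyGetD w.toList 0 ' ' ∧
         pvLast f.2 = pvLast w then
        let k := pvLcp f.2.toList w.toList
        if k > m then k else m
      else m) (0 : Int)
    let p := m + 1
    out ++ [if p ≥ L - 2 then w else pvAbbr w p L]) []

-- ===== PRECONDITION & SPEC =====
-- Pre_ excludes lists containing the empty string: Python A raises IndexError on w[0] there.
def Pre_wordsAbbreviation (words : List String) : Prop := ∀ w ∈ words, w ≠ ""
instance (words : List String) : Decidable (Pre_wordsAbbreviation words) := by
  unfold Pre_wordsAbbreviation; infer_instance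
def pvWitness_wordsAbbreviation : List String := ["abcde", "abxyz", "hi", "abcde"]

def Spec_wordsAbbreviation (words : List String) (out : List String) : Prop := out = wordsAbbreviation_alt words
instance (words : List String) (out : List String) : Decidable (Spec_wordsAbbreviation words out) := by
  unfold Spec_wordsAbbreviation; infer_instance

-- ===== CLAIM (what is proved, stated in full; the proofs are below) =====
def Claim_equal_wordsAbbreviation : Prop := ∀ (words : List String), Dom_wordsAbbreviation words → Pre_wordsAbbreviation words → Spec_wordsAbbreviation words (wordsAbbreviation words)

-- ===== LEMMAS AND PROOFS =====

-- proof-side vocabulary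
def lcpN : List Char → List Char → Nat
  | a :: as, b :: bs => if a = b then lcpN as bs + 1 else 0
  | _, _ => 0

def maxN : List Nat → Nat
  | [] => 0
  | x :: l => max x (maxN l)

/-- max LCP of `w` with the other entries (different index) of group `g`. -/
def pvM (g : List (Int × String)) (i : Int) (w : String) : Nat :=
  maxN ((g.filter (fun e => e.1 != i)).map (fun e => lcpN w.toList e.2.toList))

def pvVal (w : String) (q L : Int) : String := if q ≥ L - 2 then w else pvAbbr w q L

lemma pvLcp_eq (x y : List Char) : pvLcp x y = (lcpN x y : Int) := by
  induction x generalizing y with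
  | nil => cases y <;> simp [pvLcp, lcpN]
  | cons a as ih => cases y with
    | nil => simp [pvLcp, lcpN]
    | cons b bs =>
      simp [pvLcp, lcpN, ih]
      split <;> push_cast <;> omega

lemma lcpN_comm (x y : List Char) : lcpN x y = lcpN y x := by
  induction x generalizing y with
  | nil => cases y <;> simp [lcpN]
  | cons a as ih => cases y with
    | nil => simp [lcpN]
    | cons b bs =>
      simp [lcpN, ih]
      split <;> split <;> simp_all

lemma maxN_le {l : List Nat} {b : Nat} (h : ∀ x ∈ l, x ≤ b) : maxN l ≤ b := by
  induction l with
  | nil => simp [maxN]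
  | cons x l ih => simp only [maxN, max_le_iff]; exact ⟨h x (by simp), ih fun y hy => h y (by simp [hy])⟩

lemma le_maxN {l : List Nat} {x : Nat} (h : x ∈ l) : x ≤ maxN l := by
  induction l with
  | nil => simp at h
  | cons y l ih =>
    rcases List.mem_cons.mp h with rfl | h
    · simp [maxN]
    · exact le_trans (ih h) (by simp [maxN])

lemma prefix_le_lcpN {pre x y : List Char} (hx : pre <+: x) (hy : pre <+: y) :
    pre.length ≤ lcpN x y := by
  induction pre generalizing x y with
  | nil => simp
  | cons c pre ih =>
    obtain ⟨tx, rfl⟩ := hx; obtain ⟨ty, rfl⟩ := hy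
    simpa [lcpN] using ih (List.prefix_append pre tx) (List.prefix_append pre ty)

lemma lcpN_le_of_ne {x y : List Char} {p : Nat} {a b : Char}
    (hx : x[p]? = some a) (hy : y[p]? = some b) (hne : a ≠ b) : lcpN x y ≤ p := by
  induction p generalizing x y with
  | zero =>
    cases x with | nil => simp at hx | cons u us =>
    cases y with | nil => simp at hy | cons v vs =>
    simp at hx hy; subst hx; subst hy; simp [lcpN, hne]
  | succ p ih =>
    cases x with | nil => simp at hx | cons u us =>
    cases y with | nil => simp at hy | cons v vs =>
    simp at hx hy
    by_cases h : u = v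
    · simp [lcpN, h]; exact ih hx hy
    · simp [lcpN, h]

lemma prefix_snoc {pre x : List Char} {c : Char} (h : pre <+: x)
    (hc : x[pre.length]? = some c) : pre ++ [c] <+: x := by
  obtain ⟨t, rfl⟩ := h
  cases t with
  | nil => simp at hc
  | cons d t =>
    have hd : d = c := by
      rw [List.getElem?_append_right (by omega)] at hc
      simpa using hc
    subst hd
    exact ⟨t, by simp⟩

lemma mem_unique_fst {g : List (Int × String)} (hnd : (g.map Prod.fst).Nodup)
    {e f : Int × String} (he : e ∈ g) (hf : f ∈ g) (h : e.1 = f.1) : e = f := by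
  have h1 := List.inj_on_of_nodup_map hnd he hf h
  exact h1

lemma exists_other {g : List (Int × String)} {e : Int × String}
    (he : e ∈ g) (h2 : 2 ≤ g.length) (hnd : (g.map Prod.fst).Nodup) :
    ∃ f ∈ g, f.1 ≠ e.1 := by
  by_contra hno
  push Not at hno
  have hall : ∀ f ∈ g, f = e := fun f hf => List.inj_on_of_nodup_map hnd hf he (hno f hf)
  match g, h2 with
  | a :: b :: l, _ =>
    have ha := hall a (by simp); have hb := hall b (by simp)
    have : (a.1 :: b.1 :: l.map Prod.fst).Nodup := by simpa using hnd
    simp [ha, hb] at this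

lemma pvM_le {g : List (Int × String)} {i : Int} {w : String} {b : Nat}
    (h : ∀ f ∈ g, f.1 ≠ i → lcpN w.toList f.2.toList ≤ b) : pvM g i w ≤ b := by
  apply maxN_le; intro x hx
  simp only [List.mem_map, List.mem_filter, bne_iff_ne] at hx
  obtain ⟨f, ⟨hf, hne⟩, rfl⟩ := hx
  exact h f hf hne

lemma le_pvM {g : List (Int × String)} {i : Int} {w : String} {f : Int × String}
    (hf : f ∈ g) (hne : f.1 ≠ i) : lcpN w.toList f.2.toList ≤ pvM g i w := by
  apply le_maxN
  simp only [List.mem_map, List.mem_filter, bne_iff_ne]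
  exact ⟨f, ⟨hf, hne⟩, rfl⟩

lemma setfold_spec (g : List (Int × String)) : ∀ (ret : List String),
    (∀ e ∈ g, 0 ≤ e.1 ∧ e.1 < (ret.length : Int)) → (g.map Prod.fst).Nodup →
    (g.foldl (fun r e => PySem.List.pySetD r e.1 e.2) ret).length = ret.length ∧
    (∀ t : Nat, (∀ e ∈ g, e.1 ≠ (t : Int)) →
      (g.foldl (fun r e => PySem.List.pySetD r e.1 e.2) ret)[t]? = ret[t]?) ∧
    (∀ e ∈ g, (g.foldl (fun r e => PySem.List.pySetD r e.1 e.2) ret)[e.1.toNat]? = some e.2) := by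
  induction g with
  | nil => intro ret _ _; exact ⟨rfl, fun _ _ => rfl, by simp⟩
  | cons e g ih =>
    intro ret hidx hnd
    simp only [List.foldl_cons]
    have he0 := (hidx e (by simp)).1
    have he1 := (hidx e (by simp)).2
    rw [PySem.List.pySetD_of_nonneg _ _ he0]
    set r1 := ret.set e.1.toNat e.2 with hr1
    have hlen1 : r1.length = ret.length := by simp [hr1]
    have hnd' : (g.map Prod.fst).Nodup := (List.nodup_cons.mp hnd).2
    have hmem : e.1 ∉ g.map Prod.fst := (List.nodup_cons.mp hnd).1
    obtain ⟨hl, hu, hv⟩ := ih r1 (fun f hf => by rw [hlen1]; exact hidx f (by simp [hf])) hnd'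
    refine ⟨by rw [hl, hlen1], ?_, ?_⟩
    · intro t ht
      rw [hu t (fun f hf => ht f (by simp [hf]))]
      rw [hr1, List.getElem?_set_ne]
      intro h; exact ht e (by simp) (by omega)
    · intro f hf
      rcases List.mem_cons.mp hf with rfl | hf'
      · have ht : ∀ f' ∈ g, f'.1 ≠ (f.1.toNat : Int) := by
          intro f' hf' h
          exact hmem (List.mem_map.mpr ⟨f', hf', by omega⟩)
        rw [hu f.1.toNat ht, hr1, List.getElem?_set_self (by omega)]
      · exact hv f hf'

lemma foldgroups_spec (leng p : Int) (g : List (Int × String))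
    (hTrim : ∀ (g' : List (Int × String)) (ret : List String),
      (∀ e ∈ g', (e.2.toList.length : Int) = leng) →
      (∃ pre : List Char, (pre.length : Int) = p + 1 ∧ ∀ e ∈ g', pre <+: e.2.toList) →
      (g'.map Prod.fst).Nodup →
      (∀ e ∈ g', 0 ≤ e.1 ∧ e.1 < (ret.length : Int)) →
      (pvTrim leng g' (p+1) ret).length = ret.length ∧
      (∀ t : Nat, (∀ e ∈ g', e.1 ≠ (t : Int)) → (pvTrim leng g' (p+1) ret)[t]? = ret[t]?) ∧
      (∀ e ∈ g', (pvTrim leng g' (p+1) ret)[e.1.toNat]? =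
        some (pvVal e.2 (max (p+1) (1 + (pvM g' e.1 e.2 : Int))) leng)))
    (hlen : ∀ e ∈ g, (e.2.toList.length : Int) = leng)
    (hpre : ∃ pre : List Char, (pre.length : Int) = p ∧ ∀ e ∈ g, pre <+: e.2.toList)
    (hnd : (g.map Prod.fst).Nodup)
    (hplt : p < leng - 2) (hp : 1 ≤ p) :
    ∀ (C : List Char) (ret : List String), C.Nodup →
    (∀ e ∈ g, 0 ≤ e.1 ∧ e.1 < (ret.length : Int)) →
    (C.foldl (fun r c => pvTrim leng (g.filter (fun f => PySem.List.pyGetD f.2.toList p ' ' == c)) (p+1) r) ret).length = ret.length ∧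
    (∀ t : Nat, (∀ c ∈ C, ∀ e ∈ g.filter (fun f => PySem.List.pyGetD f.2.toList p ' ' == c), e.1 ≠ (t : Int)) →
      (C.foldl (fun r c => pvTrim leng (g.filter (fun f => PySem.List.pyGetD f.2.toList p ' ' == c)) (p+1) r) ret)[t]? = ret[t]?) ∧
    (∀ c ∈ C, ∀ e ∈ g.filter (fun f => PySem.List.pyGetD f.2.toList p ' ' == c),
      (C.foldl (fun r c => pvTrim leng (g.filter (fun f => PySem.List.pyGetD f.2.toList p ' ' == c)) (p+1) r) ret)[e.1.toNat]? =
        some (pvVal e.2 (max (p+1) (1 + (pvM (g.filter (fun f => PySem.List.pyGetD f.2.toList p ' ' == c)) e.1 e.2 : Int))) leng)) := by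
  intro C
  induction C with
  | nil => intro ret _ _; exact ⟨rfl, fun _ _ => rfl, by simp⟩
  | cons c C' ih =>
    intro ret hC hidx
    obtain ⟨pre, hprelen, hprefix⟩ := hpre
    set filt := fun c => g.filter (fun f => PySem.List.pyGetD f.2.toList p ' ' == c) with hfilt
    have hmemg : ∀ {c' : Char} {e}, e ∈ filt c' → e ∈ g ∧ PySem.List.pyGetD e.2.toList p ' ' = c' := by
      intro c' e he
      have := List.mem_filter.mp he
      exact ⟨this.1, by simpa using this.2⟩
    have hndc : ∀ c' : Char, ((filt c').map Prod.fst).Nodup :=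
      fun c' => (List.Sublist.map Prod.fst List.filter_sublist).nodup hnd
    have hcross : ∀ {c1 c2 : Char} {e f}, e ∈ filt c1 → f ∈ filt c2 → e.1 = f.1 → c1 = c2 := by
      intro c1 c2 e f he hf h
      obtain ⟨heg, hec⟩ := hmemg he; obtain ⟨hfg, hfc⟩ := hmemg hf
      have := mem_unique_fst hnd heg hfg h
      rw [← hec, ← hfc, this]
    have hpre' : ∀ c' : Char, ∃ pre2 : List Char, (pre2.length : Int) = p + 1 ∧ ∀ e ∈ filt c', pre2 <+: e.2.toList := by
      intro c'
      refine ⟨pre ++ [c'], by simp; omega, ?_⟩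
      intro e he
      obtain ⟨heg, hec⟩ := hmemg he
      apply prefix_snoc (hprefix e heg)
      have hle : (e.2.toList.length : Int) = leng := hlen e heg
      have hplen : pre.length = p.toNat := by omega
      have hlt : p.toNat < e.2.toList.length := by omega
      rw [hplen, ← hec, PySem.List.pyGetD_eq_getElem _ _ (by omega) (by omega)]
      exact List.getElem?_eq_some_iff.mpr ⟨hlt, rfl⟩
    obtain ⟨hl1, hu1, hv1⟩ := hTrim (filt c) ret
      (fun e he => hlen e (hmemg he).1)
      (hpre' c)
      (hndc c)
      (fun e he => hidx e (hmemg he).1)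
    simp only [List.foldl_cons]
    set r1 := pvTrim leng (filt c) (p+1) ret with hr1def
    obtain ⟨hl2, hu2, hv2⟩ := ih r1 (List.nodup_cons.mp hC).2
      (fun e he => ⟨(hidx e he).1, by rw [hl1]; exact (hidx e he).2⟩)
    refine ⟨by rw [hl2, hl1], ?_, ?_⟩
    · intro t ht
      rw [hu2 t (fun c' hc' e he => ht c' (by simp [hc']) e he),
          hu1 t (fun e he => ht c (by simp) e he)]
    · intro c'' hc'' e he
      rcases List.mem_cons.mp hc'' with rfl | hc'
      · have ht : ∀ c' ∈ C', ∀ f ∈ filt c', f.1 ≠ (e.1.toNat : Int) := by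
          intro c' hc' f hf h
          have h0 := (hidx e (hmemg he).1).1
          have : c'' = c' := hcross he hf (by omega)
          exact (List.nodup_cons.mp hC).1 (this ▸ hc')
        rw [hu2 e.1.toNat ht]
        exact hv1 e he
      · exact hv2 c'' hc' e he

lemma pvM_eq_zero {g : List (Int × String)} {i : Int} {w : String}
    (h : ∀ f ∈ g, f.1 = i) : pvM g i w = 0 := by
  have : g.filter (fun e => e.1 != i) = [] :=
    List.filter_eq_nil_iff.mpr (fun f hf => by simp [h f hf])
  simp [pvM, this, maxN]

lemma q_transfer {g : List (Int × String)} {e : Int × String} {pre : List Char} {p leng : Int}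
    (he : e ∈ g) (h2 : 2 ≤ g.length)
    (hnd : (g.map Prod.fst).Nodup)
    (hlen : ∀ f ∈ g, (f.2.toList.length : Int) = leng)
    (hprelen : (pre.length : Int) = p)
    (hprefix : ∀ f ∈ g, pre <+: f.2.toList)
    (hplt : p < leng - 2) (hp : 1 ≤ p) :
    max p (1 + (pvM g e.1 e.2 : Int)) =
      max (p+1) (1 + (pvM (g.filter (fun f => PySem.List.pyGetD f.2.toList p ' ' ==
        PySem.List.pyGetD e.2.toList p ' ')) e.1 e.2 : Int)) := by
  have hplen : pre.length = p.toNat := by omega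
  have hchar : ∀ f ∈ g, f.2.toList[p.toNat]? = some (PySem.List.pyGetD f.2.toList p ' ') := by
    intro f hf
    have := hlen f hf
    rw [PySem.List.pyGetD_eq_getElem _ _ (by omega) (by omega)]
    exact List.getElem?_eq_some_iff.mpr ⟨by omega, rfl⟩
  set c := PySem.List.pyGetD e.2.toList p ' ' with hcdef
  set g' := g.filter (fun f => PySem.List.pyGetD f.2.toList p ' ' == c) with hg'def
  have hmemg' : ∀ {f}, f ∈ g' → f ∈ g ∧ PySem.List.pyGetD f.2.toList p ' ' = c := by
    intro f hf
    have := List.mem_filter.mp hf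
    exact ⟨this.1, by simpa using this.2⟩
  have hing' : ∀ f ∈ g, PySem.List.pyGetD f.2.toList p ' ' = c → f ∈ g' :=
    fun f hf hc => List.mem_filter.mpr ⟨hf, by simp [hc]⟩
  have hout : ∀ f ∈ g, f ∉ g' → lcpN e.2.toList f.2.toList ≤ p.toNat := by
    intro f hf hfn
    refine lcpN_le_of_ne (hchar e he) (hchar f hf) ?_
    intro hne
    exact hfn (hing' f hf (by rw [← hne]))
  have hin : ∀ f ∈ g', p.toNat + 1 ≤ lcpN e.2.toList f.2.toList := by
    intro f hf
    obtain ⟨hfg, hfc⟩ := hmemg' hf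
    have h1 : pre ++ [c] <+: e.2.toList :=
      prefix_snoc (hprefix e he) (by rw [hplen]; exact hchar e he)
    have h2 : pre ++ [c] <+: f.2.toList :=
      prefix_snoc (hprefix f hfg) (by rw [hplen, hchar f hfg, hfc])
    have := prefix_le_lcpN h1 h2
    simpa [hplen] using this
  by_cases hex : ∃ f ∈ g', f.1 ≠ e.1
  · obtain ⟨f, hf, hfne⟩ := hex
    have hge : p.toNat + 1 ≤ pvM g' e.1 e.2 := le_trans (hin f hf) (le_pvM hf hfne)
    have hle1 : pvM g' e.1 e.2 ≤ pvM g e.1 e.2 :=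
      pvM_le (fun f' hf' hne => le_pvM (hmemg' hf').1 hne)
    have hle2 : pvM g e.1 e.2 ≤ pvM g' e.1 e.2 := by
      apply pvM_le
      intro f' hf' hne
      by_cases hf'g : f' ∈ g'
      · exact le_pvM hf'g hne
      · exact le_trans (hout f' hf' hf'g) (by omega)
    have heq : pvM g e.1 e.2 = pvM g' e.1 e.2 := le_antisymm hle2 hle1
    rw [heq]; omega
  · push Not at hex
    have h0 : pvM g' e.1 e.2 = 0 := pvM_eq_zero hex
    have hMle : pvM g e.1 e.2 ≤ p.toNat := by
      apply pvM_le
      intro f hf hne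
      by_cases hf'g : f ∈ g'
      · exact absurd (hex f hf'g) hne
      · exact hout f hf hf'g
    obtain ⟨f, hf, hfne⟩ := exists_other he h2 hnd
    have hMge : p.toNat ≤ pvM g e.1 e.2 := by
      have := prefix_le_lcpN (hprefix e he) (hprefix f hf)
      exact le_trans (by omega) (le_trans this (le_pvM hf hfne))
    have : pvM g e.1 e.2 = p.toNat := le_antisymm hMle hMge
    rw [this, h0]; omega


lemma trim_spec (leng : Int) (n : Nat) : ∀ (p : Int) (g : List (Int × String)) (ret : List String),
    (leng - 2 - p).toNat ≤ n → 1 ≤ p →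
    (∀ e ∈ g, (e.2.toList.length : Int) = leng) →
    (∃ pre : List Char, (pre.length : Int) = p ∧ ∀ e ∈ g, pre <+: e.2.toList) →
    (g.map Prod.fst).Nodup →
    (∀ e ∈ g, 0 ≤ e.1 ∧ e.1 < (ret.length : Int)) →
    (pvTrim leng g p ret).length = ret.length ∧
    (∀ t : Nat, (∀ e ∈ g, e.1 ≠ (t : Int)) → (pvTrim leng g p ret)[t]? = ret[t]?) ∧
    (∀ e ∈ g, (pvTrim leng g p ret)[e.1.toNat]? =
      some (pvVal e.2 (max p (1 + (pvM g e.1 e.2 : Int))) leng)) := by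
  induction n using Nat.strong_induction_on with
  | _ n ih =>
  intro p g ret hb hp hlen hpre hnd hidx
  rw [pvTrim.eq_def]
  split_ifs with h1 h2
  · obtain ⟨hl, hu, hv⟩ := setfold_spec g ret hidx hnd
    refine ⟨hl, hu, ?_⟩
    intro e he
    rw [hv e he, pvVal, if_pos (by omega)]
  · obtain ⟨e, rfl⟩ := List.length_eq_one_iff.mp h2
    have he0 := (hidx e (by simp)).1
    simp only []
    rw [PySem.List.pySetD_of_nonneg _ _ he0]
    have hM : pvM [e] e.1 e.2 = 0 := pvM_eq_zero (by simp)
    refine ⟨by simp, ?_, ?_⟩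
    · intro t ht
      exact List.getElem?_set_ne (by have := ht e (by simp); omega)
    · intro f hf
      rcases List.mem_cons.mp hf with rfl | hf'
      · rw [List.getElem?_set_self (by have := (hidx f (by simp)).2; omega)]
        rw [hM]
        simp only [Nat.cast_zero]
        have hmax : max p (1 + (0:Int)) = p := by omega
        rw [hmax, pvVal, if_neg h1]
      · simp at hf'
  · by_cases hg : g = []
    · subst hg
      simp only [List.foldl_nil]
      refine ⟨?_, ?_, by simp⟩
      · simp [PySem.Dict.empty]
      · intro t _; simp [PySem.Dict.empty]
    · have h2len : 2 ≤ g.length := by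
        have := List.length_pos_of_ne_nil hg; omega
      obtain ⟨pre, hprelen, hprefix⟩ := hpre
      simp only [add_sub_cancel_right]
      obtain ⟨dup, hdupdef⟩ : ∃ d, d = g.foldl (fun d e => d.modify (PySem.List.pyGetD e.2.toList p ' ') [] (· ++ [e])) PySem.Dict.empty := ⟨_, rfl⟩
      rw [← hdupdef]
      have hfold : dup
          = (g.map (fun e => (PySem.List.pyGetD e.2.toList p ' ', e))).foldl (fun d q => d.modify q.1 [] (· ++ [q.2])) PySem.Dict.empty := by
        rw [hdupdef, List.foldl_map]
      have hgetD : ∀ c, dup.getD c [] = g.filter (fun f => PySem.List.pyGetD f.2.toList p ' ' == c) := by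
        intro c
        rw [hfold, PySem.Dict.getD_foldl_modify_append]
        simp [List.filter_map, Function.comp_def, List.map_map]
      have hkeysnd : dup.keys.Nodup := by
        rw [hfold]
        exact PySem.Dict.nodup_keys_foldl_modify_key _ _ _ _ _ (by simp [PySem.Dict.empty])
      have hmemkeys : ∀ e ∈ g, PySem.List.pyGetD e.2.toList p ' ' ∈ dup.keys := by
        intro e he
        by_contra hmem
        have hcf : dup.contains (PySem.List.pyGetD e.2.toList p ' ') = false := by
          rw [← Bool.not_eq_true]
          exact fun h => hmem ((PySem.Dict.contains_iff_mem_keys _ _).mp h)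
        have h0 := PySem.Dict.getD_of_not_contains dup [] hcf
        rw [hgetD] at h0
        have : e ∈ (g.filter (fun f => PySem.List.pyGetD f.2.toList p ' ' == PySem.List.pyGetD e.2.toList p ' ')) :=
          List.mem_filter.mpr ⟨he, by simp⟩
        rw [h0] at this
        simp at this
      have hvals : dup.values = dup.keys.map (fun c => g.filter (fun f => PySem.List.pyGetD f.2.toList p ' ' == c)) := by
        rw [PySem.Dict.values_eq_map_keys dup hkeysnd []]
        exact List.map_congr_left (fun c _ => hgetD c)
      rw [hvals, List.foldl_map]
      have hTrim := fun (g' : List (Int × String)) (ret' : List String) hh1 hh2 hh3 hh4 =>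
        ih (n-1) (by omega) (p+1) g' ret' (by omega) (by omega) hh1 hh2 hh3 hh4
      obtain ⟨hl, hu, hv⟩ := foldgroups_spec leng p g hTrim hlen ⟨pre, hprelen, hprefix⟩ hnd (by omega) hp dup.keys ret hkeysnd hidx
      refine ⟨hl, ?_, ?_⟩
      · intro t ht
        exact hu t (fun c _ e he => ht e (List.mem_of_mem_filter he))
      · intro e he
        have heg' : e ∈ g.filter (fun f => PySem.List.pyGetD f.2.toList p ' ' == PySem.List.pyGetD e.2.toList p ' ') :=
          List.mem_filter.mpr ⟨he, by simp⟩
        rw [hv _ (hmemkeys e he) e heg',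
            ← q_transfer he h2len hnd hlen hprelen hprefix (by omega) hp]


def pvE (words : List String) : List (Int × String) := PySem.List.enumerate words 0
def pvGk (words : List String) (k : Char × Char × Int) : List (Int × String) :=
  (pvE words).filter (fun f => pvKey f.2 == k)
def pvOut (words : List String) (e : Int × String) : String :=
  pvVal e.2 ((pvM (pvGk words (pvKey e.2)) e.1 e.2 : Int) + 1) (PySem.Str.len e.2)

lemma mem_pvE {words : List String} {e : Int × String} (he : e ∈ pvE words) :
    0 ≤ e.1 ∧ e.1 < (words.length : Int) ∧ e.2 ∈ words := by
  rw [pvE, PySem.List.mem_enumerate_iff] at he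
  obtain ⟨k, hk, rfl⟩ := he
  refine ⟨by omega, by omega, by simp⟩

lemma ndE (words : List String) : ((pvE words).map Prod.fst).Nodup := by
  rw [pvE, PySem.List.map_fst_enumerate]
  exact PySem.List.nodup_pyRange_one _ _

lemma mem_pvGk {words : List String} {k : Char × Char × Int} {e : Int × String}
    (he : e ∈ pvGk words k) : e ∈ pvE words ∧ pvKey e.2 = k := by
  have := List.mem_filter.mp he
  exact ⟨this.1, by simpa using this.2⟩

lemma topfold_spec (words : List String) (hw : ∀ w ∈ words, w ≠ "") :
    ∀ (K : List (Char × Char × Int)) (ret : List String), K.Nodup →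
    (ret.length : Int) = (words.length : Int) →
    (K.foldl (fun r k => pvAbbreviate (pvGk words k) k.1 k.2.2 r) ret).length = ret.length ∧
    (∀ t : Nat, (∀ k ∈ K, ∀ e ∈ pvGk words k, (pvGk words k).length ≤ 1 ∨ e.1 ≠ (t : Int)) →
      (K.foldl (fun r k => pvAbbreviate (pvGk words k) k.1 k.2.2 r) ret)[t]? = ret[t]?) ∧
    (∀ k ∈ K, ∀ e ∈ pvGk words k, 2 ≤ (pvGk words k).length →
      (K.foldl (fun r k => pvAbbreviate (pvGk words k) k.1 k.2.2 r) ret)[e.1.toNat]? =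
        some (pvVal e.2 (max 1 (1 + (pvM (pvGk words k) e.1 e.2 : Int))) k.2.2)) := by
  intro K
  induction K with
  | nil => intro ret _ _; exact ⟨rfl, fun _ _ => rfl, by simp⟩
  | cons k K' ih =>
    intro ret hK hretlen
    simp only [List.foldl_cons]
    have hidxG : ∀ {k'}, ∀ e ∈ pvGk words k', 0 ≤ e.1 ∧ e.1 < (ret.length : Int) := by
      intro k' e he
      obtain ⟨h1, h2, _⟩ := mem_pvE (mem_pvGk he).1
      exact ⟨h1, by omega⟩
    have hndG : ∀ k' : Char × Char × Int, ((pvGk words k').map Prod.fst).Nodup :=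
      fun k' => (List.Sublist.map Prod.fst List.filter_sublist).nodup (ndE words)
    have hcross : ∀ {k1 k2 : Char × Char × Int} {e f}, e ∈ pvGk words k1 → f ∈ pvGk words k2 →
        e.1 = f.1 → k1 = k2 := by
      intro k1 k2 e f he hf h
      obtain ⟨heE, hek⟩ := mem_pvGk he; obtain ⟨hfE, hfk⟩ := mem_pvGk hf
      have := mem_unique_fst (ndE words) heE hfE h
      rw [← hek, ← hfk, this]
    -- effect of one pvAbbreviate step
    have hstep : ∀ r1 : List String, r1 = pvAbbreviate (pvGk words k) k.1 k.2.2 ret →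
        r1.length = ret.length ∧
        (∀ t : Nat, (∀ e ∈ pvGk words k, (pvGk words k).length ≤ 1 ∨ e.1 ≠ (t : Int)) → r1[t]? = ret[t]?) ∧
        (∀ e ∈ pvGk words k, 2 ≤ (pvGk words k).length →
          r1[e.1.toNat]? = some (pvVal e.2 (max 1 (1 + (pvM (pvGk words k) e.1 e.2 : Int))) k.2.2)) := by
      intro r1 hr1
      rw [pvAbbreviate] at hr1
      by_cases hsmall : (pvGk words k).length ≤ 1
      · rw [if_pos hsmall] at hr1
        exact ⟨by rw [hr1], fun t _ => by rw [hr1], fun e _ h => by omega⟩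
      · rw [if_neg hsmall] at hr1
        have hlenG : ∀ e ∈ pvGk words k, (e.2.toList.length : Int) = k.2.2 := by
          intro e he
          have := (mem_pvGk he).2
          rw [← this, pvKey]
          simp [PySem.Str.len_eq]
        have hpreG : ∃ pre : List Char, (pre.length : Int) = 1 ∧ ∀ e ∈ pvGk words k, pre <+: e.2.toList := by
          refine ⟨[k.1], by simp, ?_⟩
          intro e he
          obtain ⟨heE, hek⟩ := mem_pvGk he
          have hne : e.2 ≠ "" := hw e.2 (mem_pvE heE).2.2
          have hnil : e.2.toList ≠ [] := fun h => hne (by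
            have := congrArg String.ofList h
            simpa using this)
          obtain ⟨c, cs, hcons⟩ := List.exists_cons_of_ne_nil hnil
          have : k.1 = c := by
            rw [← hek, pvKey]; simp [hcons, PySem.List.pyGetD_zero_cons]
          rw [hcons, this]
          exact ⟨cs, rfl⟩
        obtain ⟨hl, hu, hv⟩ := trim_spec k.2.2 (k.2.2 - 2 - 1).toNat 1 (pvGk words k) ret (le_refl _)
          (le_refl _) hlenG hpreG (hndG k) (fun e he => hidxG e he)
        rw [hr1]
        refine ⟨hl, ?_, ?_⟩
        · intro t ht
          apply hu
          intro e he
          rcases ht e he with h | h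
          · omega
          · exact h
        · intro e he _
          exact hv e he
    obtain ⟨hl1, hu1, hv1⟩ := hstep _ rfl
    obtain ⟨hl2, hu2, hv2⟩ := ih (pvAbbreviate (pvGk words k) k.1 k.2.2 ret) (List.nodup_cons.mp hK).2
      (by rw [hl1]; exact hretlen)
    refine ⟨by rw [hl2, hl1], ?_, ?_⟩
    · intro t ht
      rw [hu2 t (fun k' hk' e he => ht k' (by simp [hk']) e he),
          hu1 t (fun e he => ht k (by simp) e he)]
    · intro k'' hk'' e he h2len
      rcases List.mem_cons.mp hk'' with rfl | hk'
      · have ht : ∀ k' ∈ K', ∀ f ∈ pvGk words k', (pvGk words k').length ≤ 1 ∨ f.1 ≠ (e.1.toNat : Int) := by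
          intro k' hk' f hf
          right
          intro h
          have h0 := (hidxG e he).1
          have : k'' = k' := hcross he hf (by omega)
          exact (List.nodup_cons.mp hK).1 (this ▸ hk')
        rw [hu2 e.1.toNat ht]
        exact hv1 e he h2len
      · exact hv2 k'' hk' e he h2len

lemma coarse_eq (w : String) (hw : w ≠ "") :
    (if PySem.Str.len w > 3 then
      String.ofList ([PySem.List.pyGetD w.toList 0 ' '] ++ PySem.Int.toChars (PySem.Str.len w - 2) ++ [pvLast w])
    else w) = pvVal w 1 (PySem.Str.len w) := by
  have hlen : PySem.Str.len w = (w.toList.length : Int) := PySem.Str.len_eq w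
  have hnil : w.toList ≠ [] := fun h => hw (by have := congrArg String.ofList h; simpa using this)
  obtain ⟨c, cs, hcons⟩ := List.exists_cons_of_ne_nil hnil
  by_cases h3 : PySem.Str.len w > 3
  · rw [if_pos h3, pvVal, if_neg (by omega), pvAbbr]
    congr 1
    have h21 : PySem.Str.len w - 1 - 1 = PySem.Str.len w - 2 := by ring
    rw [h21, PySem.List.slice_to _ (by norm_num), hcons, PySem.List.pyGetD_zero_cons]
    rfl
  · rw [if_neg h3, pvVal, if_pos (by omega)]

lemma A_eq (words : List String) (hw : ∀ w ∈ words, w ≠ "") :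
    wordsAbbreviation words = (pvE words).map (pvOut words) := by
  simp only [wordsAbbreviation]
  rw [show PySem.List.enumerate words 0 = pvE words from rfl]
  obtain ⟨groups, hgdef⟩ : ∃ d, d = (pvE words).foldl
      (fun d e => d.modify (pvKey e.2) [] (· ++ [e])) PySem.Dict.empty := ⟨_, rfl⟩
  rw [← hgdef]
  have hfold : groups = ((pvE words).map (fun e => (pvKey e.2, e))).foldl
      (fun d q => d.modify q.1 [] (· ++ [q.2])) PySem.Dict.empty := by
    rw [hgdef, List.foldl_map]
  have hgetD : ∀ k, groups.getD k [] = pvGk words k := by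
    intro k
    rw [hfold, PySem.Dict.getD_foldl_modify_append]
    simp [pvGk, List.filter_map, Function.comp_def, List.map_map]
  have hkeysnd : groups.keys.Nodup := by
    rw [hgdef]
    exact PySem.Dict.nodup_keys_foldl_modify_key _ _ _ _ _ (by simp [PySem.Dict.empty])
  have hmemkeys : ∀ e ∈ pvE words, pvKey e.2 ∈ groups.keys := by
    intro e he
    by_contra hmem
    have hcf : groups.contains (pvKey e.2) = false := by
      rw [← Bool.not_eq_true]
      exact fun h => hmem ((PySem.Dict.contains_iff_mem_keys _ _).mp h)
    have h0 := PySem.Dict.getD_of_not_contains groups [] hcf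
    rw [hgetD] at h0
    have : e ∈ pvGk words (pvKey e.2) := List.mem_filter.mpr ⟨he, by simp⟩
    rw [h0] at this
    simp at this
  have hitems : groups.items = groups.keys.map (fun k => (k, pvGk words k)) := by
    rw [PySem.Dict.items_eq_map_keys groups hkeysnd []]
    exact List.map_congr_left (fun k _ => by rw [hgetD])
  rw [hitems, List.foldl_map]
  obtain ⟨hl, hu, hv⟩ := topfold_spec words hw groups.keys
    (words.map (fun w => if PySem.Str.len w > 3 then
      String.ofList ([PySem.List.pyGetD w.toList 0 ' '] ++ PySem.Int.toChars (PySem.Str.len w - 2) ++ [pvLast w])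
    else w)) hkeysnd (by simp)
  apply List.ext_getElem?
  intro t
  by_cases ht : t < words.length
  · have heE : ((t : Int), words[t]) ∈ pvE words := by
      rw [pvE, PySem.List.mem_enumerate_iff]
      exact ⟨t, ht, by simp⟩
    have hRHS : ((pvE words).map (pvOut words))[t]? = some (pvOut words ((t : Int), words[t])) := by
      simp [pvE, PySem.List.getElem?_enumerate, List.getElem?_map,
        List.getElem?_eq_getElem ht]
    rw [hRHS]
    have heG : ((t : Int), words[t]) ∈ pvGk words (pvKey words[t]) :=
      List.mem_filter.mpr ⟨heE, by simp⟩
    by_cases h2 : 2 ≤ (pvGk words (pvKey words[t])).length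
    · have hval := hv _ (hmemkeys _ heE) _ heG h2
      simp only [Int.toNat_natCast] at hval
      rw [hval]
      congr 1
      rw [pvOut]
      have hmax : max 1 (1 + ((pvM (pvGk words (pvKey words[t])) (t : Int) words[t] : Nat) : Int))
          = ((pvM (pvGk words (pvKey words[t])) (t : Int) words[t] : Nat) : Int) + 1 := by omega
      rw [hmax]
      rfl
    · have hunt : ∀ k ∈ groups.keys, ∀ f ∈ pvGk words k,
          (pvGk words k).length ≤ 1 ∨ f.1 ≠ ((t : Nat) : Int) := by
        intro k hk f hf
        by_cases hft : f.1 = ((t : Nat) : Int)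
        · left
          have hfe : f = ((t : Int), words[t]) := mem_unique_fst (ndE words) (mem_pvGk hf).1 heE hft
          have hkk : k = pvKey words[t] := by
            have := (mem_pvGk hf).2
            rw [hfe] at this
            rw [← this]
          rw [hkk]
          omega
        · right; exact hft
      rw [hu t hunt, List.getElem?_map, List.getElem?_eq_getElem ht]
      simp only [Option.map_some]
      congr 1
      rw [coarse_eq words[t] (hw _ (List.getElem_mem ht))]
      have hG1 : pvGk words (pvKey words[t]) = [((t : Int), words[t])] := by
        have hpos : 0 < (pvGk words (pvKey words[t])).length := List.length_pos_of_mem heG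
        obtain ⟨a, ha⟩ := List.length_eq_one_iff.mp (show (pvGk words (pvKey words[t])).length = 1 by omega)
        rw [ha] at heG ⊢
        simp at heG
        rw [heG]
      rw [pvOut, hG1, pvM_eq_zero (by simp)]
      simp
  · rw [List.getElem?_eq_none, List.getElem?_eq_none]
    · simp only [List.length_map, pvE, PySem.List.length_enumerate]
      omega
    · rw [hl]
      simp only [List.length_map]
      omega

lemma condmax_fold (w : String) (l : List (Int × String))
    (C : (Int × String) → Prop) [DecidablePred C] :
    ∀ m0 : Nat,
    l.foldl (fun m f =>
      if C f then
        (if pvLcp f.2.toList w.toList > m then pvLcp f.2.toList w.toList else m)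
      else m) ((m0 : Nat) : Int)
    = ((max m0 (maxN ((l.filter (fun a => decide (C a))).map (fun f => lcpN w.toList f.2.toList))) : Nat) : Int) := by
  induction l with
  | nil => intro m0; simp [maxN]
  | cons a l ih =>
    intro m0
    simp only [List.foldl_cons]
    by_cases hC : C a
    · rw [if_pos hC]
      have hstep : (if pvLcp a.2.toList w.toList > ((m0 : Nat) : Int) then pvLcp a.2.toList w.toList
          else ((m0 : Nat) : Int)) = ((max m0 (lcpN w.toList a.2.toList) : Nat) : Int) := by
        rw [pvLcp_eq, lcpN_comm]
        split_ifs <;> push_cast <;> omega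
      rw [hstep, ih]
      congr 1
      simp only [List.filter_cons, decide_eq_true_eq, if_pos hC, List.map_cons, maxN]
      omega
    · rw [if_neg hC, ih]
      congr 2
      simp only [List.filter_cons, decide_eq_true_eq, if_neg hC]

lemma condmax_fold0 (w : String) (l : List (Int × String))
    (C : (Int × String) → Prop) [DecidablePred C] :
    l.foldl (fun m f =>
      if C f then
        (if pvLcp f.2.toList w.toList > m then pvLcp f.2.toList w.toList else m)
      else m) (0 : Int)
    = ((maxN ((l.filter (fun a => decide (C a))).map (fun f => lcpN w.toList f.2.toList)) : Nat) : Int) := by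
  have h := condmax_fold w l C 0
  simpa using h

lemma Bm_eq (words : List String) (e : Int × String) :
    ((pvE words).foldl (fun m f =>
      if f.1 ≠ e.1 ∧ PySem.Str.len f.2 = PySem.Str.len e.2 ∧
         PySem.List.pyGetD f.2.toList 0 ' ' = PySem.List.pyGetD e.2.toList 0 ' ' ∧
         pvLast f.2 = pvLast e.2 then
        (if pvLcp f.2.toList e.2.toList > m then pvLcp f.2.toList e.2.toList else m)
      else m) (0 : Int))
    = ((pvM (pvGk words (pvKey e.2)) e.1 e.2 : Nat) : Int) := by
  rw [condmax_fold0 e.2 (pvE words) _]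
  congr 1
  rw [pvM, pvGk, List.filter_filter]
  refine congrArg maxN (congrArg (List.map _) (List.filter_congr ?_))
  intro f _
  rw [Bool.eq_iff_iff]
  simp only [Bool.and_eq_true, bne_iff_ne, decide_eq_true_eq, beq_iff_eq, pvKey, Prod.ext_iff]
  tauto

lemma B_eq (words : List String) :
    wordsAbbreviation_alt words = (pvE words).map (pvOut words) := by
  simp only [wordsAbbreviation_alt]
  rw [show PySem.List.enumerate words 0 = pvE words from rfl]
  rw [PySem.List.foldl_append_singleton_eq_map]
  rw [List.nil_append]
  apply List.map_congr_left
  intro e _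
  rw [Bm_eq words e]
  rfl

lemma final_eq (words : List String) (hw : ∀ w ∈ words, w ≠ "") :
    wordsAbbreviation words = wordsAbbreviation_alt words := by
  rw [A_eq words hw, B_eq words]

-- ===== VERDICT (by name: the statement is the Claim_ definition above) =====
theorem wordsAbbreviation_spec : Claim_equal_wordsAbbreviation := by
  intro words _ hpre
  unfold Spec_wordsAbbreviation
  exact final_eq words hpre
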